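-- pv_equiv track=rewrite | github.com/jongmin1/Coding-Test | 투포인터/1484.py | find_weights
-- ===== SOURCE A (Python) =====
-- def find_weights(G):
--     left = 1
--     right = 2
--     results = []
--
--     while right > left:
--         diff = right**2 - left**2
--         if diff == G:
--             results.append(right)
--             right += 1
--         elif diff < G:
--             right += 1
--         else:
--             left += 1
--
--     return results
-- ===== SOURCE B (Python) =====
-- def find_weights(G):
--     # Enumerate divisor pairs a*b = G with a < b instead of sweeping two pointers:
--     # right = (a+b)/2 whenever a+b is even; collect and reverse for increasing order.
--     results = []
--     a = 1
--     while a * a < G: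
--         if G % a == 0:
--             b = G // a
--             if (a + b) % 2 == 0:
--                 results.append((a + b) // 2)
--         a += 1
--     results.reverse()
--     return results
-- ===== Notes on version B (the rewrite author's own statement) =====
-- stated objective: faster
-- what changed: Replaced the O(G) two-pointer sweep by enumerating divisor pairs a*b=G with a<sqrt(G) and recovering right=(a+G/a)/2 when a+G/a is even, then reversing for increasing order.
import Mathlib
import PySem

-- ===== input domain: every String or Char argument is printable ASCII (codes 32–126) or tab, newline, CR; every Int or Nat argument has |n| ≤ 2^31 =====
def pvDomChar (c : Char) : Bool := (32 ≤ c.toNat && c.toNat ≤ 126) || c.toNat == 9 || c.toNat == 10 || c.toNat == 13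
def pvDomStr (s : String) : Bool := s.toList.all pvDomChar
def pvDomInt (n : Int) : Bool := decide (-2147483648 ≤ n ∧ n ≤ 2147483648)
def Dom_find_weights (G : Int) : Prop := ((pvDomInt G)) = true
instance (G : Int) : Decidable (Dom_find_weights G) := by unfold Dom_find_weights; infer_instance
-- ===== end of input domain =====

-- B replaces A's two-pointer sweep by a divisor-pair enumeration (a*b = G, right = (a+b)/2).

-- ===== PORT A =====
-- A's while-loop, step for step; the fuel argument only makes the recursion total
-- (2*G.toNat+4 always suffices, proved in loopA_spec below).
def loopA (G : Int) : Nat → Int → Int → List Int → List Int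
  | 0, _, _, acc => acc
  | n + 1, left, right, acc =>
    if right > left then
      let diff := right * right - left * left
      if diff = G then loopA G n left (right + 1) (acc ++ [right])
      else if diff < G then loopA G n left (right + 1) acc
      else loopA G n (left + 1) right acc
    else acc

def find_weights (G : Int) : List Int := loopA G (2 * G.toNat + 4) 1 2 []

-- ===== PORT B =====
-- B's while-loop over candidate divisors a with a*a < G, fuel-guarded likewise
-- (G.toNat+2 always suffices, proved in loopB_spec below).
def loopB (G : Int) : Nat → Int → List Int → List Int
  | 0, _, acc => acc
  | n + 1, a, acc =>
    if a * a < G then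
      loopB G n (a + 1)
        (if PySem.Int.mod G a = 0 ∧ PySem.Int.mod (a + PySem.Int.floordiv G a) 2 = 0 then
          acc ++ [PySem.Int.floordiv (a + PySem.Int.floordiv G a) 2]
        else acc)
    else acc

def find_weights_alt (G : Int) : List Int := (loopB G (G.toNat + 2) 1 []).reverse

-- ===== PRECONDITION & SPEC =====
def Spec_find_weights (G : Int) (out : List Int) : Prop := out = find_weights_alt G
instance (G : Int) (out : List Int) : Decidable (Spec_find_weights G out) := by unfold Spec_find_weights; infer_instance

-- ===== CLAIM (what is proved, stated in full; the proofs are below) =====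
def Claim_equal_find_weights : Prop := ∀ (G : Int), Dom_find_weights G → Spec_find_weights G (find_weights G)

-- ===== LEMMAS AND PROOFS =====

-- r is a solution: some left l with 1 ≤ l < r and r² - l² = G
def Sol (G r : Int) : Prop := ∃ l : Int, 1 ≤ l ∧ l < r ∧ r * r - l * l = G

-- two strictly increasing lists with the same members are equal
lemma eq_of_pairwise_lt_of_mem_iff : ∀ (l₁ l₂ : List Int),
    l₁.Pairwise (· < ·) → l₂.Pairwise (· < ·) → (∀ x, x ∈ l₁ ↔ x ∈ l₂) → l₁ = l₂ := by
  intro l₁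
  induction l₁ with
  | nil =>
    intro l₂ _ _ h
    cases l₂ with
    | nil => rfl
    | cons b t => exact absurd ((h b).2 (List.mem_cons_self)) (List.not_mem_nil)
  | cons a t ih =>
    intro l₂ h₁ h₂ h
    cases l₂ with
    | nil => exact absurd ((h a).1 (List.mem_cons_self)) (List.not_mem_nil)
    | cons b t₂ =>
      have hab : a = b := by
        rcases List.mem_cons.1 ((h a).1 List.mem_cons_self) with h' | h'
        · exact h'
        · have hba := List.mem_cons.1 ((h b).2 List.mem_cons_self)
          rcases hba with h'' | h''
          · exact h''.symm
          · have := (List.pairwise_cons.1 h₁).1 b h''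
            have := (List.pairwise_cons.1 h₂).1 a h'
            omega
      subst hab
      have htail : ∀ x, x ∈ t ↔ x ∈ t₂ := by
        intro x
        constructor
        · intro hx
          have hax := (List.pairwise_cons.1 h₁).1 x hx
          rcases List.mem_cons.1 ((h x).1 (List.mem_cons_of_mem _ hx)) with h' | h'
          · omega
          · exact h'
        · intro hx
          have hax := (List.pairwise_cons.1 h₂).1 x hx
          rcases List.mem_cons.1 ((h x).2 (List.mem_cons_of_mem _ hx)) with h' | h'
          · omega
          · exact h'
      exact congrArg _ (ih t₂ (List.pairwise_cons.1 h₁).2 (List.pairwise_cons.1 h₂).2 htail)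

-- at a terminated state (left = right, 2*right ≥ G+2, I1) acc is the full solution list
lemma loopA_done (G right : Int) (acc : List Int)
    (h3 : 2 ≤ right) (hbig : 2 * right ≥ G + 2)
    (hI1 : ∀ l, 1 ≤ l → l < right → right * right - l * l > G)
    (hmem : ∀ r, r ∈ acc ↔ Sol G r ∧ r < right) :
    ∀ r, r ∈ acc ↔ Sol G r := by
  intro r
  rw [hmem]
  constructor
  · exact fun h => h.1
  · intro hs
    refine ⟨hs, ?_⟩
    by_contra hge
    push Not at hge
    obtain ⟨l, hl1, hlr, heq⟩ := hs
    by_cases hc : l < right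
    · have := hI1 l hl1 hc
      have hrsq : right * right ≤ r * r := by nlinarith
      nlinarith
    · push Not at hc
      have : r + l ≤ r * r - l * l := by nlinarith
      omega

lemma loopA_spec (G : Int) : ∀ (n : Nat) (left right : Int) (acc : List Int),
    1 ≤ left → left ≤ right → 2 ≤ right →
    (∀ l, 1 ≤ l → l < left → right * right - l * l > G) →
    acc.Pairwise (· < ·) →
    (∀ r, r ∈ acc ↔ Sol G r ∧ r < right) →
    (2 * (G + 2 - left - right).toNat + (right - left).toNat ≤ n) →
    (loopA G n left right acc).Pairwise (· < ·) ∧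
      (∀ r, r ∈ loopA G n left right acc ↔ Sol G r) := by
  intro n
  induction n with
  | zero =>
    intro left right acc h1 h2 h3 hI1 hacc hmem hfuel
    have hlr : left = right := by omega
    subst hlr
    refine ⟨hacc, loopA_done G left acc h3 (by omega) (fun l a b => hI1 l a b) hmem⟩
  | succ n ih =>
    intro left right acc h1 h2 h3 hI1 hacc hmem hfuel
    simp only [loopA]
    by_cases hg : right > left
    · simp only [if_pos hg]
      have hkey : right + left ≤ right * right - left * left := by nlinarith
      by_cases he : right * right - left * left = G
      · simp only [if_pos he]
        have hmem' : ∀ r, r ∈ acc ++ [right] ↔ Sol G r ∧ r < right + 1 := by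
          intro r
          simp only [List.mem_append, List.mem_singleton, hmem]
          constructor
          · rintro (⟨hs, hlt⟩ | rfl)
            · exact ⟨hs, by omega⟩
            · exact ⟨⟨left, h1, hg, he⟩, by omega⟩
          · rintro ⟨hs, hlt⟩
            by_cases h' : r < right
            · exact Or.inl ⟨hs, h'⟩
            · exact Or.inr (by omega)
        refine ih left (right + 1) (acc ++ [right]) h1 (by omega) (by omega) ?_ ?_ hmem' (by omega)
        · intro l hl hlr
          have := hI1 l hl hlr
          nlinarith
        · refine List.pairwise_append.2 ⟨hacc, List.pairwise_singleton _ _, ?_⟩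
          intro x hx y hy
          simp at hy; subst hy
          exact ((hmem x).1 hx).2
      · simp only [if_neg he]
        by_cases hlt : right * right - left * left < G
        · simp only [if_pos hlt]
          have hmem' : ∀ r, r ∈ acc ↔ Sol G r ∧ r < right + 1 := by
            intro r
            rw [hmem]
            constructor
            · rintro ⟨hs, h'⟩; exact ⟨hs, by omega⟩
            · rintro ⟨hs, h'⟩
              refine ⟨hs, ?_⟩
              by_contra h''
              have hr : r = right := by omega
              subst hr
              obtain ⟨l, hl1, hlr2, heq⟩ := hs
              by_cases hc : l < left
              · have := hI1 l hl1 hc; omega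
              · push Not at hc
                have : l * l ≥ left * left := by nlinarith
                omega
          refine ih left (right + 1) acc h1 (by omega) (by omega) ?_ hacc hmem' (by omega)
          intro l hl hlr
          have := hI1 l hl hlr
          nlinarith
        · simp only [if_neg hlt]
          refine ih (left + 1) right acc (by omega) (by omega) h3 ?_ hacc hmem (by omega)
          intro l hl hlr
          by_cases hc : l < left
          · exact hI1 l hl hc
          · have : l = left := by omega
            subst this; omega
    · simp only [if_neg hg]
      have hlr : left = right := by omega
      subst hlr
      have hbig : 2 * left ≥ G + 2 := by
        have := hI1 (left - 1) (by omega) (by omega)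
        nlinarith
      exact ⟨hacc, loopA_done G left acc h3 hbig (fun l a b => hI1 l a b) hmem⟩

def Hit (G a r : Int) : Prop :=
  1 ≤ a ∧ a * a < G ∧ G % a = 0 ∧ (a + G / a) % 2 = 0 ∧ r = (a + G / a) / 2

lemma hit_mul (G a r : Int) (h : Hit G a r) : a * (G / a) = G := by
  obtain ⟨h1, h2, h3, _, _⟩ := h
  have := Int.mul_ediv_add_emod G a
  omega

lemma hit_lt (G a r : Int) (h : Hit G a r) : a < G / a := by
  have hm := hit_mul G a r h
  obtain ⟨h1, h2, _, _, _⟩ := h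
  nlinarith

lemma hit_anti (G a₁ r₁ a₂ r₂ : Int) (h₁ : Hit G a₁ r₁) (h₂ : Hit G a₂ r₂)
    (hlt : a₁ < a₂) : r₂ < r₁ := by
  have hm1 := hit_mul G a₁ r₁ h₁
  have hm2 := hit_mul G a₂ r₂ h₂
  have hb1 := hit_lt G a₁ r₁ h₁
  have hb2 := hit_lt G a₂ r₂ h₂
  obtain ⟨p1, q1, _, e1, rfl⟩ := h₁
  obtain ⟨p2, q2, _, e2, rfl⟩ := h₂
  have hsum : a₂ + G / a₂ < a₁ + G / a₁ := by nlinarith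
  omega

lemma sol_iff_hit (G r : Int) : Sol G r ↔ ∃ a, Hit G a r := by
  constructor
  · rintro ⟨l, hl1, hlr, heq⟩
    refine ⟨r - l, ?_, ?_, ?_, ?_, ?_⟩
    · omega
    · nlinarith
    · have : G = (r - l) * (r + l) := by linear_combination -heq
      rw [this]
      exact Int.mul_emod_right _ _
    · have hdiv : G / (r - l) = r + l := by
        have : G = (r - l) * (r + l) := by linear_combination -heq
        rw [this, Int.mul_ediv_cancel_left _ (by omega)]
      rw [hdiv]; omega
    · have hdiv : G / (r - l) = r + l := by
        have : G = (r - l) * (r + l) := by linear_combination -heq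
        rw [this, Int.mul_ediv_cancel_left _ (by omega)]
      rw [hdiv]; omega
  · rintro ⟨a, ha⟩
    have hm := hit_mul G a r ha
    have hb := hit_lt G a r ha
    obtain ⟨h1, h2, h3, h4, rfl⟩ := ha
    refine ⟨(G / a - a) / 2, by omega, by omega, ?_⟩
    have h2r : 2 * ((a + G / a) / 2) = a + G / a := by omega
    have h2l : 2 * ((G / a - a) / 2) = G / a - a := by omega
    nlinarith

lemma loopB_spec (G : Int) : ∀ (n : Nat) (a : Int) (acc : List Int),
    1 ≤ a →
    acc.Pairwise (· > ·) →
    (∀ r, r ∈ acc ↔ ∃ a', a' < a ∧ Hit G a' r) →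
    ((G - a * a).toNat ≤ n) →
    (loopB G n a acc).Pairwise (· > ·) ∧
      (∀ r, r ∈ loopB G n a acc ↔ ∃ a', Hit G a' r) := by
  intro n
  induction n with
  | zero =>
    intro a acc h1 hacc hmem hfuel
    simp only [loopB]
    refine ⟨hacc, fun r => ?_⟩
    rw [hmem]
    constructor
    · rintro ⟨a', _, h⟩; exact ⟨a', h⟩
    · rintro ⟨a', h⟩
      refine ⟨a', ?_, h⟩
      by_contra hc
      have hga : G ≤ a * a := by omega
      have : a ≤ a' := by omega
      have := h.2.1
      have := h.1
      nlinarith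
  | succ n ih =>
    intro a acc h1 hacc hmem hfuel
    simp only [loopB]
    by_cases hg : a * a < G
    · simp only [if_pos hg]
      have hmod : PySem.Int.mod G a = G % a := PySem.Int.mod_eq_emod_of_pos (by omega)
      have hdiv : PySem.Int.floordiv G a = G / a := PySem.Int.floordiv_eq_ediv_of_pos (by omega)
      have hmod2 : ∀ x : Int, PySem.Int.mod x 2 = x % 2 := fun x => PySem.Int.mod_eq_emod_of_pos (by omega)
      have hdiv2 : ∀ x : Int, PySem.Int.floordiv x 2 = x / 2 := fun x => PySem.Int.floordiv_eq_ediv_of_pos (by omega)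
      have hsq : (a + 1) * (a + 1) = a * a + 2 * a + 1 := by ring
      by_cases hc : G % a = 0 ∧ (a + G / a) % 2 = 0
      · rw [if_pos (by rw [hmod, hdiv, hmod2]; exact hc)]
        rw [hdiv, hdiv2]
        have hhit : Hit G a ((a + G / a) / 2) := ⟨h1, hg, hc.1, hc.2, rfl⟩
        have hpair : (acc ++ [(a + G / a) / 2]).Pairwise (· > ·) := by
          refine List.pairwise_append.2 ⟨hacc, List.pairwise_singleton _ _, ?_⟩
          intro x hx y hy
          simp at hy; subst hy
          obtain ⟨a', ha', hx'⟩ := (hmem x).1 hx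
          exact hit_anti G a' x a _ hx' hhit ha'
        have hmem' : ∀ r, r ∈ acc ++ [(a + G / a) / 2] ↔ ∃ a', a' < a + 1 ∧ Hit G a' r := by
          intro r
          simp only [List.mem_append, List.mem_singleton, hmem]
          constructor
          · rintro (⟨a', ha', h⟩ | rfl)
            · exact ⟨a', by omega, h⟩
            · exact ⟨a, by omega, hhit⟩
          · rintro ⟨a', ha', h⟩
            by_cases h' : a' < a
            · exact Or.inl ⟨a', h', h⟩
            · have : a' = a := by omega
              subst this
              exact Or.inr h.2.2.2.2
        exact ih (a + 1) _ (by omega) hpair hmem' (by omega)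
      · rw [if_neg (by rw [hmod, hdiv, hmod2]; exact hc)]
        have hmem' : ∀ r, r ∈ acc ↔ ∃ a', a' < a + 1 ∧ Hit G a' r := by
          intro r
          rw [hmem]
          constructor
          · rintro ⟨a', ha', h⟩; exact ⟨a', by omega, h⟩
          · rintro ⟨a', ha', h⟩
            by_cases h' : a' < a
            · exact ⟨a', h', h⟩
            · have : a' = a := by omega
              subst this
              exact absurd ⟨h.2.2.1, h.2.2.2.1⟩ hc
        exact ih (a + 1) _ (by omega) hacc hmem' (by omega)
    · simp only [if_neg hg]
      refine ⟨hacc, fun r => ?_⟩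
      rw [hmem]
      constructor
      · rintro ⟨a', _, h⟩; exact ⟨a', h⟩
      · rintro ⟨a', h⟩
        refine ⟨a', ?_, h⟩
        by_contra hcc
        have h2 : a ≤ a' := by omega
        have := h.2.1
        have := h.1
        nlinarith

-- ===== VERDICT (by name: the statement is the Claim_ definition above) =====
theorem find_weights_spec : Claim_equal_find_weights := by
  intro G _
  unfold Spec_find_weights find_weights find_weights_alt
  have hA := loopA_spec G (2 * G.toNat + 4) 1 2 [] (by omega) (by omega) (by omega)
    (by intro l h1 h2; omega)
    (by simp)
    (by intro r; simp [Sol]; intro l h1 h2 _; omega)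
    (by omega)
  have hB := loopB_spec G (G.toNat + 2) 1 [] (by omega) (by simp)
    (by intro r; simp [Hit]; intro a' ha'; omega)
    (by omega)
  apply eq_of_pairwise_lt_of_mem_iff _ _ hA.1
  · simpa [List.pairwise_reverse] using hB.1
  · intro x
    rw [hA.2, List.mem_reverse, hB.2, sol_iff_hit]
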